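-- pv_equiv track=rewrite | github.com/kstevica/captain-claw | captain_claw/web/rest_file_upload.py | _normalize_zip_member_path
-- ===== SOURCE A (Python) =====
-- import posixpath
--
-- def _normalize_zip_member_path(raw: str) -> str | None:
--     """Validate and normalize a zip member path, rejecting traversal attempts."""
--     cleaned = str(raw or "").replace("\\", "/")
--     if not cleaned:
--         return None
--     parts = [part for part in cleaned.split("/") if part and part != "."]
--     if not parts:
--         return None
--     normalized = posixpath.normpath("/".join(parts))
--     if not normalized or normalized in {".", ".."}:
--         return None
--     if normalized.startswith("../") or normalized.startswith("/"):
--         raise ValueError(f"Archive member escapes target directory: {raw}")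
--     if any(part in {"..", ""} for part in normalized.split("/")):
--         raise ValueError(f"Archive member escapes target directory: {raw}")
--     return normalized
-- ===== SOURCE B (Python) =====
-- def _normalize_zip_member_path(raw):
--     """Validate and normalize a zip member path, rejecting traversal attempts."""
--     cleaned = str(raw or "").replace("\\", "/")
--     if not cleaned:
--         return None
--     stack = []
--     for part in cleaned.split("/"):
--         if not part or part == ".":
--             continue
--         if part == "..":
--             if stack and stack[-1] != "..":
--                 stack.pop()
--             else:
--                 stack.append("..")
--         else:
--             stack.append(part)
--     if not stack or stack == [".."]:
--         return None
--     if stack[0] == "..":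
--         raise ValueError(f"Archive member escapes target directory: {raw}")
--     return "/".join(stack)
-- ===== Notes on version B (the rewrite author's own statement) =====
-- stated objective: simpler
-- what changed: B replaces the join -> posixpath.normpath -> re-split -> string-prefix/membership checks pipeline with a single pass over the split segments maintaining an explicit stack (a parent-directory segment pops a normal top entry, otherwise it is pushed), reading the None/ValueError verdicts directly off the stack instead of off the normalized string.
import Mathlib
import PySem

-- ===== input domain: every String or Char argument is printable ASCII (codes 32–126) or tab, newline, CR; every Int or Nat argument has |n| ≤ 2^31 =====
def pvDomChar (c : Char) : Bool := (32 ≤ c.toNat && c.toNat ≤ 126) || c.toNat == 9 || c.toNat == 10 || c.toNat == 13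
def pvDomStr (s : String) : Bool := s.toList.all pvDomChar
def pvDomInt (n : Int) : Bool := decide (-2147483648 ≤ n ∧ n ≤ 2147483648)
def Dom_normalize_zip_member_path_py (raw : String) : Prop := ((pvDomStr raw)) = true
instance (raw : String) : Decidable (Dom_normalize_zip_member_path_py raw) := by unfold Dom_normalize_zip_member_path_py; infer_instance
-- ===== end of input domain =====

-- B replaces A's join → posixpath.normpath → re-split → string-level checks pipeline with one
-- explicit stack pass over the split segments; objective: simpler (same cost).
-- On inputs where A raises ValueError (escaping archive paths), B raises the same ValueError;
-- those inputs are excluded by Pre_ (a raise has no Option String value to compare).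

-- ===== PORT A =====
-- helper: the loop body of CPython's posixpath.normpath, branch for branch
def pyNormpathStep (initial_slashes : Nat) (acc : List String) (comp : String) : List String :=
  if comp = "" ∨ comp = "." then acc
  else if comp ≠ ".." ∨ (initial_slashes = 0 ∧ acc = []) ∨ (acc ≠ [] ∧ acc.getLast? = some "..") then
    acc ++ [comp]
  else if acc ≠ [] then acc.dropLast
  else acc

def pyNormpath (path : String) : String :=
  if path = "" then "."
  else
    let initial_slashes : Nat :=
      if PySem.Str.startswith path "/" then
        (if PySem.Str.startswith path "//" ∧ ¬ PySem.Str.startswith path "///" then 2 else 1)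
      else 0
    let comps := (PySem.Str.split? path "/").getD []
    let new_comps := comps.foldl (pyNormpathStep initial_slashes) []
    let joined := PySem.Str.join "/" new_comps
    let joined := if initial_slashes ≠ 0 then PySem.Str.join "" (List.replicate initial_slashes "/") ++ joined else joined
    if joined = "" then "." else joined

def normalize_zip_member_path_py (raw : String) : Option String :=
  let cleaned := PySem.Str.replace raw "\\" "/"
  if cleaned = "" then none
  else
    let parts := ((PySem.Str.split? cleaned "/").getD []).filter (fun p => p != "" && p != ".")
    if parts = [] then none
    else
      let normalized := pyNormpath (PySem.Str.join "/" parts)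
      if normalized = "" ∨ normalized = "." ∨ normalized = ".." then none
      else if PySem.Str.startswith normalized "../" ∨ PySem.Str.startswith normalized "/" then
        none
      else if (((PySem.Str.split? normalized "/").getD []).any (fun p => p == ".." || p == "")) then
        none
      else some normalized

-- ===== PORT B =====
-- helper: the body of B's single stack loop
def altStep (stack : List String) (part : String) : List String :=
  if part = "" ∨ part = "." then stack
  else if part = ".." then
    (if stack ≠ [] ∧ stack.getLast? ≠ some ".." then stack.dropLast else stack ++ [".."])
  else stack ++ [part]

def normalize_zip_member_path_py_alt (raw : String) : Option String :=
  let cleaned := PySem.Str.replace raw "\\" "/"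
  if cleaned = "" then none
  else
    let stack := ((PySem.Str.split? cleaned "/").getD []).foldl altStep []
    if stack = [] ∨ stack = [".."] then none
    else if stack.head? = some ".." then none
    else some (PySem.Str.join "/" stack)

-- ===== PRECONDITION & SPEC =====
-- arithmetic depth signature of a path: (number of unmatched '..' segments, net depth gained)
def pvSigStep (s : Nat × Nat) (p : String) : Nat × Nat :=
  if p = "" ∨ p = "." then s
  else if p = ".." then (if 0 < s.2 then (s.1, s.2 - 1) else (s.1 + 1, s.2))
  else (s.1, s.2 + 1)

-- Pre_ excludes exactly the escaping archive paths, on which A raises ValueError (B raises the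
-- same ValueError): those whose count u of unmatched parent-directory segments is ≥ 1 while
-- u plus the net depth is ≥ 2.
def Pre_normalize_zip_member_path_py (raw : String) : Prop :=
  let sig := (((PySem.Str.split? (PySem.Str.replace raw "\\" "/") "/").getD []).foldl pvSigStep (0, 0))
  ¬ (1 ≤ sig.1 ∧ 2 ≤ sig.1 + sig.2)

-- skip lemmas: both step functions ignore '' and '.' segments, so folding over the raw
-- split list equals folding over the filtered list

instance (raw : String) : Decidable (Pre_normalize_zip_member_path_py raw) := by
  unfold Pre_normalize_zip_member_path_py; infer_instance

def pvWitness_normalize_zip_member_path_py : String := "docs/./sub/../readme.txt"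

def Spec_normalize_zip_member_path_py (raw : String) (out : Option String) : Prop := out = normalize_zip_member_path_py_alt raw
instance (raw : String) (out : Option String) : Decidable (Spec_normalize_zip_member_path_py raw out) := by unfold Spec_normalize_zip_member_path_py; infer_instance

-- ===== CLAIM (what is proved, stated in full; the proofs are below) =====
def Claim_equal_normalize_zip_member_path_py : Prop := ∀ (raw : String), Dom_normalize_zip_member_path_py raw → Pre_normalize_zip_member_path_py raw → Spec_normalize_zip_member_path_py raw (normalize_zip_member_path_py raw)

-- ===== LEMMAS AND PROOFS =====

-- PySem.Chars.splitOn with a one-character separator is Mathlib's List.splitOn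
theorem pvGo_eq (c : Char) (l : List Char) : ∀ (fuel : Nat) (cur : List Char) (acc : List (List Char)),
    l.length < fuel →
    PySem.Chars.splitOn.go [c] fuel l cur acc =
      acc.reverse ++ List.modifyHead (cur.reverse ++ ·) (List.splitOn c l) := by
  induction l with
  | nil =>
    intro fuel cur acc h
    cases fuel with
    | zero => omega
    | succ f =>
      simp [PySem.Chars.splitOn.go, List.splitOn, List.splitOnP_nil]
  | cons ch rest ih =>
    intro fuel cur acc h
    cases fuel with
    | zero => omega
    | succ f =>
      rw [PySem.Chars.splitOn.go]
      simp only [List.length_cons] at h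
      by_cases hc : c = ch
      · have hpre : [c].isPrefixOf (ch :: rest) = true := by simp [List.isPrefixOf, hc]
        rw [if_pos hpre]
        have : List.drop [c].length (ch :: rest) = rest := by simp
        rw [this, ih f [] (cur.reverse :: acc) (by omega)]
        have hsplit : List.splitOn c (ch :: rest) = [] :: List.splitOn c rest := by
          simp [List.splitOn, List.splitOnP_cons, hc]
        rw [hsplit]
        rcases hrec : List.splitOn c rest with _ | ⟨p, ps⟩
        · exact absurd hrec (List.splitOnP_ne_nil _ _)
        · simp
      · have hpre : [c].isPrefixOf (ch :: rest) = false := by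
          simp [List.isPrefixOf, hc]
        rw [if_neg (by simp [hpre])]
        rw [ih f (ch :: cur) acc (by omega)]
        have hsplit : List.splitOn c (ch :: rest) = List.modifyHead (List.cons ch) (List.splitOn c rest) := by
          simp [List.splitOn, List.splitOnP_cons]
          intro h'; exact absurd h'.symm hc
        rw [hsplit, List.modifyHead_modifyHead]
        rcases hrec : List.splitOn c rest with _ | ⟨p, ps⟩
        · exact absurd hrec (List.splitOnP_ne_nil _ _)
        · simp

theorem pvSplitOn_eq (c : Char) (s : List Char) :
    PySem.Chars.splitOn s [c] = List.splitOn c s := by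
  rw [PySem.Chars.splitOn, pvGo_eq c s (s.length + 1) [] [] (by omega)]
  rcases hrec : List.splitOn c s with _ | ⟨p, ps⟩
  · exact absurd hrec (List.splitOnP_ne_nil _ _)
  · simp

theorem pvStrSplit (s : String) :
    (PySem.Str.split? s "/").getD [] = (List.splitOn '/' s.toList).map String.ofList := by
  rw [PySem.Str.split?]
  have : "/".toList = ['/'] := rfl
  rw [this, PySem.Chars.split?]
  simp [pvSplitOn_eq]

theorem pvSplitOn_no_sep (c : Char) (s : List Char) :
    ∀ p ∈ List.splitOn c s, c ∉ p := by
  induction s with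
  | nil => simp [List.splitOn, List.splitOnP_nil]
  | cons ch rest ih =>
    intro p hp
    by_cases hc : c = ch
    · rw [List.splitOn, List.splitOnP_cons] at hp
      simp [hc] at hp
      rcases hp with h | h
      · simp [h]
      · exact ih p (by rw [List.splitOn]; subst hc; exact h)
    · rw [List.splitOn, List.splitOnP_cons] at hp
      have : (ch == c) = false := by simp; intro h'; exact absurd h'.symm hc
      rw [if_neg (by simp [this])] at hp
      rcases hrec : List.splitOn c rest with _ | ⟨q, qs⟩
      · exact absurd hrec (List.splitOnP_ne_nil _ _)
      · rw [List.splitOn] at hrec; rw [hrec] at hp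
        simp at hp
        rcases hp with h | h
        · subst h; intro hmem
          rcases List.mem_cons.mp hmem with h | h
          · exact hc h
          · exact ih q (by rw [List.splitOn, hrec]; simp) h
        · exact (ih p (by rw [List.splitOn, hrec]; simp [h]))

theorem pvJoin_toList (stack : List String) :
    (PySem.Str.join "/" stack).toList = PySem.Chars.join ['/'] (stack.map String.toList) := by
  rw [PySem.Str.join]
  have : "/".toList = ['/'] := rfl
  rw [this, String.toList_ofList]

theorem pvRoundtrip (parts : List String) (hne : parts ≠ [])
    (h : ∀ p ∈ parts, '/' ∉ p.toList) :
    (PySem.Str.split? (PySem.Str.join "/" parts) "/").getD [] = parts := by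
  rw [pvStrSplit, pvJoin_toList, PySem.Chars.join]
  have h1 : List.splitOn '/' (['/'].intercalate (parts.map String.toList)) = parts.map String.toList := by
    apply List.splitOn_intercalate
    · intro l hl
      rcases List.mem_map.mp hl with ⟨p, hp, rfl⟩
      exact h p hp
    · simp [hne]
  rw [h1, List.map_map]
  have : (String.ofList ∘ String.toList) = id := by
    funext s; simp [String.ofList_toList]
  rw [this, List.map_id]

theorem pvJoin_ne_empty (stack : List String) (hne : stack ≠ []) (h : ∀ p ∈ stack, p ≠ "") :
    PySem.Str.join "/" stack ≠ "" := by
  intro hcontra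
  have : (PySem.Str.join "/" stack).toList = [] := by rw [hcontra]; rfl
  rw [pvJoin_toList] at this
  rcases stack with _ | ⟨x, t⟩
  · exact hne rfl
  · rcases t with _ | ⟨y, t⟩
    · rw [List.map_cons, List.map_nil, PySem.Chars.join_singleton] at this
      exact h x (by simp) (by rw [← String.ofList_toList (s := x), this])
    · rw [List.map_cons, List.map_cons, PySem.Chars.join_cons_cons] at this
      simp at this

theorem pvJoin_eq_single (stack : List String) (t : String) (hslash : '/' ∉ t.toList)
    (hne : stack ≠ []) (h : ∀ p ∈ stack, '/' ∉ p.toList) :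
    PySem.Str.join "/" stack = t ↔ stack = [t] := by
  constructor
  · intro heq
    rcases stack with _ | ⟨x, t'⟩
    · exact absurd rfl hne
    · rcases t' with _ | ⟨y, rest⟩
      · have : x = t := by
          have := congrArg String.toList heq
          rw [pvJoin_toList, List.map_cons, List.map_nil, PySem.Chars.join_singleton] at this
          rw [← String.ofList_toList (s := x), this, String.ofList_toList]
        rw [this]
      · exfalso
        have := congrArg String.toList heq
        rw [pvJoin_toList, List.map_cons, List.map_cons, PySem.Chars.join_cons_cons] at this
        apply hslash
        rw [← this]
        simp
  · intro heq
    subst heq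
    have h2 : (PySem.Str.join "/" [t]).toList = t.toList := by
      rw [pvJoin_toList, List.map_cons, List.map_nil, PySem.Chars.join_singleton]
    rw [← String.ofList_toList (s := PySem.Str.join "/" [t]), h2, String.ofList_toList]

theorem pvJoin_not_startswith_slash (stack : List String) (h : ∀ p ∈ stack, p ≠ "" ∧ '/' ∉ p.toList) :
    ¬ PySem.Str.startswith (PySem.Str.join "/" stack) "/" = true := by
  intro hc
  rw [PySem.Str.startswith_eq, PySem.Chars.startswith_iff] at hc
  have hpre : "/".toList <+: (PySem.Str.join "/" stack).toList := hc
  rw [pvJoin_toList] at hpre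
  rcases stack with _ | ⟨x, t⟩
  · simp [PySem.Chars.join_nil] at hpre
  · have hx := h x (by simp)
    rcases hxl : x.toList with _ | ⟨cx, xs⟩
    · exact hx.1 (by rw [← String.ofList_toList (s := x), hxl])
    · have hjoin : ∃ w, PySem.Chars.join ['/'] ((x :: t).map String.toList) = x.toList ++ w := by
        rcases t with _ | ⟨y, t⟩
        · exact ⟨[], by simp [PySem.Chars.join_singleton]⟩
        · refine ⟨['/'] ++ PySem.Chars.join ['/'] ((y :: t).map String.toList), ?_⟩
          rw [List.map_cons, List.map_cons, PySem.Chars.join_cons_cons]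
          simp
      rcases hjoin with ⟨w, hw⟩
      rw [hw, hxl] at hpre
      rcases hpre with ⟨tail, htail⟩
      simp at htail
      apply hx.2
      rw [hxl, ← htail.1]
      simp

theorem pvJoin_not_startswith_dotdot (stack : List String)
    (h : ∀ p ∈ stack, p ≠ ".." ∧ p ≠ "" ∧ p ≠ "." ∧ '/' ∉ p.toList) :
    ¬ PySem.Str.startswith (PySem.Str.join "/" stack) "../" = true := by
  intro hc
  rw [PySem.Str.startswith_eq, PySem.Chars.startswith_iff] at hc
  have hpre : ['.', '.', '/'] <+: (PySem.Str.join "/" stack).toList := hc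
  rw [pvJoin_toList] at hpre
  rcases stack with _ | ⟨x, t⟩
  · simp [PySem.Chars.join_nil] at hpre
  · have hx := h x (by simp)
    -- L = x.toList ++ w with w = [] or '/':: …
    have hjoin : ∃ w, PySem.Chars.join ['/'] ((x :: t).map String.toList) = x.toList ++ w ∧
        (w = [] ∨ ∃ w', w = '/' :: w') := by
      rcases t with _ | ⟨y, t⟩
      · exact ⟨[], by simp [PySem.Chars.join_singleton], Or.inl rfl⟩
      · refine ⟨'/' :: PySem.Chars.join ['/'] ((y :: t).map String.toList), ?_, Or.inr ⟨_, rfl⟩⟩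
        rw [List.map_cons, List.map_cons, PySem.Chars.join_cons_cons]
        simp
    rcases hjoin with ⟨w, hw, hwshape⟩
    rw [hw] at hpre
    rcases hxl : x.toList with _ | ⟨c1, xs1⟩
    · exact hx.2.1 (by rw [← String.ofList_toList (s := x), hxl])
    rcases xs1 with _ | ⟨c2, xs2⟩
    · -- x is a single char: c1 = '.', so x = "." contra, or w mismatch
      rw [hxl] at hpre
      rcases hpre with ⟨tail, htail⟩
      simp at htail
      obtain ⟨h1, h2⟩ := htail
      -- h1 : c1 = '.'; h2 : w = '.' :: '/' :: tail
      rcases hwshape with rfl | ⟨w', rfl⟩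
      · simp at h2
      · simp at h2
    rcases xs2 with _ | ⟨c3, xs3⟩
    · -- x has exactly two chars: both '.', so x = ".."
      rw [hxl] at hpre
      rcases hpre with ⟨tail, htail⟩
      simp at htail
      exact hx.1 (by rw [← String.ofList_toList (s := x), hxl, ← htail.1, ← htail.2.1])
    · -- x has ≥ 3 chars: third char is '/', contradicting slash-freeness
      rw [hxl] at hpre
      rcases hpre with ⟨tail, htail⟩
      simp at htail
      apply hx.2.2.2
      rw [hxl, ← htail.2.2.1]
      simp

def pvGood (rest : List String) : Prop :=
  ∀ p ∈ rest, p ≠ ".." ∧ p ≠ "" ∧ p ≠ "." ∧ '/' ∉ p.toList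

theorem pvStepA0_eq_altStep : pyNormpathStep 0 = altStep := by
  funext acc comp
  unfold pyNormpathStep altStep
  by_cases h1 : comp = "" ∨ comp = "."
  · simp [h1]
  · rw [if_neg h1, if_neg h1]
    by_cases h2 : comp = ".."
    · subst h2
      by_cases h3 : acc = []
      · subst h3; simp
      · by_cases h4 : acc.getLast? = some ".."
        · simp [h3, h4]
        · simp [h3, h4]
    · simp [h2]

theorem pvInv (comps : List String) (h : ∀ p ∈ comps, '/' ∉ p.toList) :
    ∀ (u : Nat) (rest : List String), pvGood rest →
    ∃ u' rest', comps.foldl altStep (List.replicate u ".." ++ rest) = List.replicate u' ".." ++ rest' ∧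
      pvGood rest' ∧ comps.foldl pvSigStep (u, rest.length) = (u', rest'.length) := by
  induction comps with
  | nil => intro u rest hr; exact ⟨u, rest, rfl, hr, rfl⟩
  | cons comp comps ih =>
    intro u rest hr
    have hcomp : '/' ∉ comp.toList := h comp (by simp)
    have hrest : ∀ p ∈ comps, '/' ∉ p.toList := fun p hp => h p (by simp [hp])
    rw [List.foldl_cons, List.foldl_cons]
    by_cases h1 : comp = "" ∨ comp = "."
    · rw [show altStep (List.replicate u ".." ++ rest) comp = List.replicate u ".." ++ rest by
        unfold altStep; rw [if_pos h1],
        show pvSigStep (u, rest.length) comp = (u, rest.length) by unfold pvSigStep; rw [if_pos h1]]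
      exact ih hrest u rest hr
    · by_cases h2 : comp = ".."
      · subst h2
        rcases hre : rest with _ | ⟨r0, rs⟩
        · -- rest = []: push ".."
          have hstack : altStep (List.replicate u ".." ++ []) ".." = List.replicate (u+1) ".." ++ [] := by
            unfold altStep
            rw [if_neg h1, if_pos rfl]
            rcases u with _ | u
            · simp
            · rw [if_neg]
              · simp [List.replicate_succ' (n := u+1)]
              · intro hcon
                apply hcon.2
                simp [List.getLast?_replicate]
          rw [hstack,
            show pvSigStep (u, List.length []) ".." = (u+1, List.length ([] : List String)) by
              unfold pvSigStep; rw [if_neg h1, if_pos rfl]; simp]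
          exact ih hrest (u+1) [] (by intro p hp; simp at hp)
        · -- rest nonempty: pop its last element
          have hlast : (List.replicate u ".." ++ rest).getLast? = rest.getLast? := by
            rw [List.getLast?_append]
            rcases hg : rest.getLast? with _ | g
            · rw [hre] at hg; simp [List.getLast?_cons] at hg
            · simp
          have hlastne : rest.getLast? ≠ some ".." := by
            rw [hre]
            rcases hg : (r0 :: rs).getLast? with _ | g
            · simp [List.getLast?_cons] at hg
            · intro hcon
              have : g ∈ r0 :: rs := List.mem_of_getLast? hg
              have := hr g (by rw [hre]; exact this)
              simp at hcon
              exact this.1 (by rw [← hcon])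
          have hstack : altStep (List.replicate u ".." ++ rest) ".." =
              List.replicate u ".." ++ rest.dropLast := by
            unfold altStep
            rw [if_neg h1, if_pos rfl, if_pos, List.dropLast_append_of_ne_nil (by rw [hre]; simp)]
            constructor
            · rw [hre]; simp
            · rw [hlast, hre]; rw [hre] at hlastne; exact hlastne
          rw [← hre, hstack,
            show pvSigStep (u, rest.length) ".." = (u, rest.dropLast.length) by
              unfold pvSigStep
              rw [if_neg h1, if_pos rfl, if_pos (by rw [hre]; simp)]
              rw [List.length_dropLast]]
          exact ih hrest u rest.dropLast (by
            intro p hp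
            exact hr p (List.mem_of_mem_dropLast hp))
      · -- ordinary segment: push it
        have hstack : altStep (List.replicate u ".." ++ rest) comp =
            List.replicate u ".." ++ (rest ++ [comp]) := by
          unfold altStep
          rw [if_neg h1, if_neg h2]
          simp
        rw [hstack,
          show pvSigStep (u, rest.length) comp = (u, (rest ++ [comp]).length) by
            unfold pvSigStep; rw [if_neg h1, if_neg h2]; simp]
        apply ih hrest u (rest ++ [comp])
        intro p hp
        rcases List.mem_append.mp hp with hp | hp
        · exact hr p hp
        · simp at hp
          subst hp
          push_neg at h1
          exact ⟨h2, h1.1, h1.2, hcomp⟩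

theorem pvAltStep_skip (comps : List String) (init : List String) :
    (comps.filter (fun p => p != "" && p != ".")).foldl altStep init = comps.foldl altStep init := by
  rw [List.foldl_filter]
  congr 1
  funext acc y
  by_cases hy : y = "" ∨ y = "."
  · have hb : (y != "" && y != ".") = false := by rcases hy with h | h <;> simp [h]
    rw [hb]
    simp only [Bool.false_eq_true, if_false]
    unfold altStep
    rw [if_pos hy]
  · have hb : (y != "" && y != ".") = true := by
      rcases not_or.mp hy with ⟨h1, h2⟩
      simp [h1, h2]
    rw [hb]
    simp

theorem pvSigStep_skip (comps : List String) (init : Nat × Nat) :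
    (comps.filter (fun p => p != "" && p != ".")).foldl pvSigStep init = comps.foldl pvSigStep init := by
  rw [List.foldl_filter]
  congr 1
  funext acc y
  by_cases hy : y = "" ∨ y = "."
  · have hb : (y != "" && y != ".") = false := by rcases hy with h | h <;> simp [h]
    rw [hb]
    simp only [Bool.false_eq_true, if_false]
    unfold pvSigStep
    rw [if_pos hy]
  · have hb : (y != "" && y != ".") = true := by
      rcases not_or.mp hy with ⟨h1, h2⟩
      simp [h1, h2]
    rw [hb]
    simp

theorem pvMainAux (raw : String)
    (hpre : Pre_normalize_zip_member_path_py raw) :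
    normalize_zip_member_path_py raw = normalize_zip_member_path_py_alt raw := by
  unfold normalize_zip_member_path_py normalize_zip_member_path_py_alt
  simp only []
  set cleaned := PySem.Str.replace raw "\\" "/" with hcl
  by_cases hc0 : cleaned = ""
  · rw [if_pos hc0, if_pos hc0]
  rw [if_neg hc0, if_neg hc0]
  set comps := (PySem.Str.split? cleaned "/").getD [] with hcomps
  set parts := comps.filter (fun p => p != "" && p != ".") with hparts
  have hcomp_no : ∀ p ∈ comps, '/' ∉ p.toList := by
    intro p hp
    rw [hcomps, pvStrSplit] at hp
    rcases List.mem_map.mp hp with ⟨q, hq, rfl⟩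
    rw [String.toList_ofList]
    exact pvSplitOn_no_sep '/' cleaned.toList q hq
  have hparts_no : ∀ p ∈ parts, '/' ∉ p.toList := by
    intro p hp
    exact hcomp_no p (List.mem_of_mem_filter hp)
  have hparts_props : ∀ p ∈ parts, p ≠ "" ∧ p ≠ "." := by
    intro p hp
    have := List.of_mem_filter hp
    simpa using this
  have hstackeq : comps.foldl altStep [] = parts.foldl altStep [] := (pvAltStep_skip comps []).symm
  set stack := comps.foldl altStep [] with hstk
  obtain ⟨u', rest', hstack_shape, hgood, hsig⟩ := by
    have := pvInv parts hparts_no 0 [] (by intro p hp; simp at hp)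
    simpa using this
  rw [← hstackeq] at hstack_shape
  have hsig' : comps.foldl pvSigStep (0, 0) = (u', rest'.length) := by
    rw [← pvSigStep_skip comps (0,0), ← hparts, hsig]
  have hpre' : ¬ (1 ≤ u' ∧ 2 ≤ u' + rest'.length) := by
    unfold Pre_normalize_zip_member_path_py at hpre
    simp only [← hcl, ← hcomps] at hpre
    rw [hsig'] at hpre
    exact hpre
  by_cases hp0 : parts = []
  · rw [if_pos hp0]
    have hnil : stack = [] := by rw [hstackeq, hp0]; rfl
    rw [if_pos (Or.inl hnil)]
  rw [if_neg hp0]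
  -- evaluate pyNormpath on the joined parts
  set path := PySem.Str.join "/" parts with hpath
  have hpath_ne : path ≠ "" :=
    pvJoin_ne_empty parts hp0 (fun p hp => (hparts_props p hp).1)
  have hpath_noslash : PySem.Str.startswith path "/" = false := by
    have := pvJoin_not_startswith_slash parts (fun p hp => ⟨(hparts_props p hp).1, hparts_no p hp⟩)
    rw [hpath]
    exact Bool.eq_false_iff.mpr this
  have hnorm : pyNormpath path = (if PySem.Str.join "/" stack = "" then "." else PySem.Str.join "/" stack) := by
    unfold pyNormpath
    rw [if_neg hpath_ne]
    simp only [hpath_noslash, Bool.false_eq_true, if_false]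
    rw [pvRoundtrip parts hp0 hparts_no]
    rw [pvStepA0_eq_altStep, ← hstackeq]
    simp
  rw [hnorm]
  by_cases hs0 : stack = []
  · have hj : PySem.Str.join "/" stack = "" := by rw [hs0]; rfl
    rw [if_pos hj]
    rw [if_pos (Or.inl hs0)]
    simp
  have hstack_props : ∀ p ∈ stack, p ≠ "" ∧ p ≠ "." ∧ '/' ∉ p.toList := by
    intro p hp
    rw [hstack_shape] at hp
    rcases List.mem_append.mp hp with hp | hp
    · have : p = ".." := List.eq_of_mem_replicate hp
      subst this
      refine ⟨by decide, by decide, by decide⟩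
    · have := hgood p hp
      exact ⟨this.2.1, this.2.2.1, this.2.2.2⟩
  have hj_ne : PySem.Str.join "/" stack ≠ "" :=
    pvJoin_ne_empty stack hs0 (fun p hp => (hstack_props p hp).1)
  rw [if_neg hj_ne]
  by_cases hs1 : stack = [".."]
  · have hj : PySem.Str.join "/" stack = ".." := by rw [hs1]; decide
    rw [if_pos (Or.inr (Or.inr hj)), if_pos (Or.inr hs1)]
  -- now u' = 0
  have hu0 : u' = 0 := by
    by_contra hu
    apply hpre'
    refine ⟨by omega, ?_⟩
    have hlen : stack.length = u' + rest'.length := by rw [hstack_shape]; simp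
    have h1 : 1 ≤ stack.length := by
      rcases stack with _ | ⟨x, t⟩
      · exact absurd rfl hs0
      · simp
    rcases Nat.lt_or_ge stack.length 2 with h2 | h2
    · exfalso
      apply hs1
      have : stack.length = 1 := by omega
      have hu1 : u' = 1 ∧ rest'.length = 0 := by
        constructor <;> omega
      rw [hstack_shape, hu1.1, List.length_eq_zero_iff.mp hu1.2]
      rfl
    · omega
  rw [hu0] at hstack_shape
  simp only [List.replicate_zero, List.nil_append] at hstack_shape
  have hgood_stack : pvGood stack := by rw [hstack_shape]; exact hgood
  -- A's remaining guards are all false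
  have hne_dot : PySem.Str.join "/" stack ≠ "." := by
    intro hcon
    have := (pvJoin_eq_single stack "." (by decide) hs0 (fun p hp => (hstack_props p hp).2.2)).mp hcon
    have := hstack_props "." (by rw [this]; simp)
    exact this.2.1 rfl
  have hne_dd : PySem.Str.join "/" stack ≠ ".." := by
    intro hcon
    exact hs1 ((pvJoin_eq_single stack ".." (by decide) hs0 (fun p hp => (hstack_props p hp).2.2)).mp hcon)
  rw [if_neg (by
    push_neg
    exact ⟨hj_ne, hne_dot, hne_dd⟩)]
  have hsw1 : ¬ PySem.Str.startswith (PySem.Str.join "/" stack) "../" = true :=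
    pvJoin_not_startswith_dotdot stack hgood_stack
  have hsw2 : ¬ PySem.Str.startswith (PySem.Str.join "/" stack) "/" = true :=
    pvJoin_not_startswith_slash stack (fun p hp => ⟨(hstack_props p hp).1, (hstack_props p hp).2.2⟩)
  rw [if_neg (by
    push_neg
    exact ⟨hsw1, hsw2⟩)]
  have hsplitback : (PySem.Str.split? (PySem.Str.join "/" stack) "/").getD [] = stack :=
    pvRoundtrip stack hs0 (fun p hp => (hstack_props p hp).2.2)
  rw [if_neg (by
    rw [hsplitback]
    simp only [List.any_eq_true, not_exists, not_and]
    intro p hp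
    have h1 := hgood_stack p hp
    simp [h1.1, h1.2.1])]
  rw [if_neg (by
    rintro (h | h)
    · exact hs0 h
    · exact hs1 h)]
  rw [if_neg (by
    intro hcon
    have hmem : ".." ∈ stack := List.mem_of_mem_head? (by rw [hcon]; rfl)
    exact (hgood_stack ".." hmem).1 rfl)]

-- ===== VERDICT (by name: the statement is the Claim_ definition above) =====
theorem normalize_zip_member_path_py_spec : Claim_equal_normalize_zip_member_path_py := by
  intro raw _ hpre
  unfold Spec_normalize_zip_member_path_py
  exact pvMainAux raw hpre
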